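-- pv_equiv track=rewrite | github.com/Shreya0413/geeksforgeeks-problems | Program to print reciprocal of letters.py | reciprocalString
-- ===== SOURCE A (Python) =====
-- def reciprocalString(S):
--     s1=""
--     for i in S:
--         if i.isupper():
--             s1=s1+chr(ord("A")+ord("Z")-ord(i))
--         elif i.islower():
--             s1=s1+chr(ord("a")+ord("z")-ord(i))
--         else:
--             s1=s1+i
--     return s1
-- ===== SOURCE B (Python) =====
-- def reciprocalString(S):
--     table = {c: chr(ord("A") + ord("Z") - c) for c in range(ord("A"), ord("Z") + 1)}
--     table.update({c: chr(ord("a") + ord("z") - c) for c in range(ord("a"), ord("z") + 1)})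
--     return S.translate(table)
-- ===== Notes on version B (the rewrite author's own statement) =====
-- stated objective: idiomatic
-- what changed: Replaces the explicit per-character loop with repeated string concatenation by a 52-entry translation table built once and a single S.translate call.
import Mathlib
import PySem

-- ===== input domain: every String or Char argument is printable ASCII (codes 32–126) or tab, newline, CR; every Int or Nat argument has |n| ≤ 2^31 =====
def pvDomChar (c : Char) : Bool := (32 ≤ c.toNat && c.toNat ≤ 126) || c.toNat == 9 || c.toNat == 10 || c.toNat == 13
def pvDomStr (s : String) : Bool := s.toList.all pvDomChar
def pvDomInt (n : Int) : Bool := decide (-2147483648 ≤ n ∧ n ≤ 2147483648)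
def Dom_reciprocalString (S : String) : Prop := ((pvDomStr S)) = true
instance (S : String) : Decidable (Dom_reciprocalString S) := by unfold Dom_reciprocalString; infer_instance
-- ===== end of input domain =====

-- B replaces A's per-character if/elif loop by a 52-entry translation table built once and a single translate pass (idiomatic; return value only).

-- ===== PORT A =====
def reciprocalString (S : String) : String :=
  String.ofList (S.toList.foldl (fun s1 i =>
    if PySem.Chars.isupper i then s1 ++ [Char.ofNat (65 + 90 - i.toNat)]
    else if PySem.Chars.islower i then s1 ++ [Char.ofNat (97 + 122 - i.toNat)]
    else s1 ++ [i]) [])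

-- ===== PORT B =====
-- the dict comprehension over range(ord('A'), ord('Z')+1), then .update over the lowercase range
def pvRecTable : PySem.Dict Int Char :=
  let t := (PySem.List.pyRange 65 91 1).foldl
      (fun d c => PySem.Dict.insert d c (Char.ofNat (65 + 90 - c.toNat))) PySem.Dict.empty
  (PySem.List.pyRange 97 123 1).foldl
      (fun d c => PySem.Dict.insert d c (Char.ofNat (97 + 122 - c.toNat))) t

-- S.translate(table): each char is replaced by its table entry, chars absent from the table are kept
def reciprocalString_alt (S : String) : String :=
  String.ofList (S.toList.map (fun c => (PySem.Dict.get? pvRecTable ((c.toNat : Int))).getD c))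

-- ===== PRECONDITION & SPEC =====
def Spec_reciprocalString (S : String) (out : String) : Prop := out = reciprocalString_alt S
instance (S : String) (out : String) : Decidable (Spec_reciprocalString S out) := by unfold Spec_reciprocalString; infer_instance

-- ===== CLAIM (what is proved, stated in full; the proofs are below) =====
def Claim_equal_reciprocalString : Prop := ∀ (S : String), Dom_reciprocalString S → Spec_reciprocalString S (reciprocalString S)

-- ===== LEMMAS AND PROOFS =====

def pvStepA (i : Char) : Char :=
  if PySem.Chars.isupper i then Char.ofNat (65 + 90 - i.toNat)
  else if PySem.Chars.islower i then Char.ofNat (97 + 122 - i.toNat)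
  else i

theorem pvFoldA (l : List Char) (acc : List Char) :
    l.foldl (fun s1 i =>
      if PySem.Chars.isupper i then s1 ++ [Char.ofNat (65 + 90 - i.toNat)]
      else if PySem.Chars.islower i then s1 ++ [Char.ofNat (97 + 122 - i.toNat)]
      else s1 ++ [i]) acc = acc ++ l.map pvStepA := by
  induction l generalizing acc with
  | nil => simp
  | cons x xs ih =>
      simp only [List.foldl_cons, List.map_cons, ih, pvStepA]
      split_ifs <;> simp

set_option maxRecDepth 100000 in
theorem pvCharCase (n : Nat) (hn : n < 127) :
    pvStepA (Char.ofNat n) =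
      (PySem.Dict.get? pvRecTable (((Char.ofNat n).toNat : Int))).getD (Char.ofNat n) := by
  revert hn; revert n; decide

theorem pvCharEq (c : Char) (hc : pvDomChar c = true) :
    pvStepA c = (PySem.Dict.get? pvRecTable ((c.toNat : Int))).getD c := by
  have h127 : c.toNat < 127 := by
    simp [pvDomChar] at hc
    omega
  have := pvCharCase c.toNat h127
  rwa [Char.ofNat_toNat] at this

-- ===== VERDICT (by name: the statement is the Claim_ definition above) =====
theorem reciprocalString_spec : Claim_equal_reciprocalString := by
  intro S hdom
  unfold Spec_reciprocalString reciprocalString reciprocalString_alt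
  rw [pvFoldA]
  simp only [List.nil_append]
  refine congrArg String.ofList (List.map_congr_left ?_)
  intro c hc
  apply pvCharEq
  have := (List.all_eq_true.mp hdom) c hc
  simpa using this
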